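-- pv_equiv track=rewrite | github.com/Sergeileduc/lemonde-sl | src/lemonde_sl/tools.py | pick_best_src
-- ===== SOURCE A (Python) =====
-- def pick_best_src(srcset: str, target_width: int = 664) -> str | None:
--     """
--     Choisit l'URL du srcset la plus proche de target_width.
--     """
--     candidates = []
--     for entry in srcset.split(","):
--         parts = entry.strip().split(" ")
--         if len(parts) != 2:
--             continue
--         url, width = parts
--         try:
--             width = int(width.rstrip("w"))  # type: ignore
--             candidates.append((width, url))
--         except ValueError:
--             continue
--
--     if not candidates:
--         return None
--
--     # Choisir la largeur la plus proche
--     best = min(candidates, key=lambda x: abs(x[0] - target_width))  # type: ignore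
--     return best[1]
-- ===== SOURCE B (Python) =====
-- def _parse_entry(entry):
--     """Parse one srcset entry into (url, width), or None if malformed."""
--     parts = entry.strip().split(" ")
--     if len(parts) != 2:
--         return None
--     url, width = parts
--     try:
--         return url, int(width.rstrip("w"))
--     except ValueError:
--         return None
--
--
-- def pick_best_src(srcset: str, target_width: int = 664) -> str | None:
--     """Single pass over the srcset: keep the best (closest-width) URL so far."""
--     best_url = None
--     best_dist = None
--     for entry in srcset.split(","):
--         p = _parse_entry(entry)
--         if p is None:
--             continue
--         url, w = p
--         dist = abs(w - target_width)
--         if best_dist is None or dist < best_dist: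
--             best_url, best_dist = url, dist
--     return best_url
-- ===== Notes on version B (the rewrite author's own statement) =====
-- stated objective: alternative
-- what changed: B fuses A's two phases (build the full width/url candidate list, then min with an abs-distance key) into one streaming pass via a helper that parses each entry, keeping only the best URL and its distance so far; a strict less-than comparison preserves min's first-wins tie behaviour and no intermediate list is built.
import Mathlib
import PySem

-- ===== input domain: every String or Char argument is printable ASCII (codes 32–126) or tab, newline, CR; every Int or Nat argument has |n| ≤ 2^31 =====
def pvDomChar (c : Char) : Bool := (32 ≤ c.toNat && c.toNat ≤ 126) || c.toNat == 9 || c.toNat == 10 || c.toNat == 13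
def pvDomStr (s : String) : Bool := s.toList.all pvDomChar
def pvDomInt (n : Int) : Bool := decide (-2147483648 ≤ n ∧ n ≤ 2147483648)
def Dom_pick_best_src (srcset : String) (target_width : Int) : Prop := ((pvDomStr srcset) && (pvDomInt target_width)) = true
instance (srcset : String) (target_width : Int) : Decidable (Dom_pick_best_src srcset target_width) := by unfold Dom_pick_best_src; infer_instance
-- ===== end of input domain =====

-- B replaces A's build-a-candidate-list-then-min with a single pass keeping the best URL seen so far (objective: alternative decomposition; same value, first minimum wins in both).

-- exact hand port of Python's width.rstrip("w") (drop trailing 'w' characters), used by both ports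
def rstripW (s : String) : String :=
  String.ofList ((s.toList.reverse.dropWhile (· == 'w')).reverse)

-- srcset.split(",") : sep is the non-empty literal ",", so split? always returns some; .getD [] is exact
-- ===== PORT A =====
def pick_best_src (srcset : String) (target_width : Int) : Option String :=
  let candidates : List (Int × String) :=
    ((PySem.Str.split? srcset ",").getD []).foldl (fun acc entry =>
      match (PySem.Str.split? (PySem.Str.strip entry) " ").getD [] with
      | [url, width] =>
        match PySem.Int.ofStr? (rstripW width) with
        | some w => acc ++ [(w, url)]
        | none => acc
      | _ => acc) []
  if candidates.isEmpty then none
  else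
    match PySem.List.min? candidates (fun x => |x.1 - target_width|) with
    | some best => some best.2
    | none => none

-- ===== PORT B =====
-- B's helper _parse_entry; 'url, width = parts' after the length test is ported by headD (exact there), try/except int(..) by Option.map
def parse_entry (entry : String) : Option (String × Int) :=
  let parts := (PySem.Str.split? (PySem.Str.strip entry) " ").getD []
  if parts.length ≠ 2 then none
  else (PySem.Int.ofStr? (rstripW (parts.tail.headD ""))).map (fun w => (parts.headD "", w))

-- 'best_dist is None or dist < best_dist' is ported as the short-circuit Bool it is
def pick_best_src_alt (srcset : String) (target_width : Int) : Option String :=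
  (((PySem.Str.split? srcset ",").getD []).foldl (fun (st : Option String × Option Int) entry =>
      (parse_entry entry).elim st (fun p =>
        let dist := |p.2 - target_width|
        if st.2.isNone || decide (dist < st.2.getD 0) then (some p.1, some dist) else st))
    (none, none)).1

-- ===== PRECONDITION & SPEC =====
def Spec_pick_best_src (srcset : String) (target_width : Int) (out : Option String) : Prop := out = pick_best_src_alt srcset target_width
instance (srcset : String) (target_width : Int) (out : Option String) : Decidable (Spec_pick_best_src srcset target_width out) := by unfold Spec_pick_best_src; infer_instance

-- ===== CLAIM (what is proved, stated in full; the proofs are below) =====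
def Claim_equal_pick_best_src : Prop := ∀ (srcset : String) (target_width : Int), Dom_pick_best_src srcset target_width → Spec_pick_best_src srcset target_width (pick_best_src srcset target_width)

-- ===== LEMMAS AND PROOFS =====

-- the per-entry parse both loops perform, as a function
def parseE (entry : String) : Option (Int × String) :=
  match (PySem.Str.split? (PySem.Str.strip entry) " ").getD [] with
  | [url, width] => (PySem.Int.ofStr? (rstripW width)).map (fun w => (w, url))
  | _ => none

-- A's loop step, expressed through parseE
theorem stepA_fun :
    (fun (acc : List (Int × String)) (entry : String) =>
      match (PySem.Str.split? (PySem.Str.strip entry) " ").getD [] with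
      | [url, width] =>
        match PySem.Int.ofStr? (rstripW width) with
        | some w => acc ++ [(w, url)]
        | none => acc
      | _ => acc) =
    (fun acc entry =>
      match parseE entry with
      | some (w, u) => acc ++ [(w, u)]
      | none => acc) := by
  funext acc entry
  unfold parseE
  rcases h : (PySem.Str.split? (PySem.Str.strip entry) " ").getD [] with _ | ⟨u, _ | ⟨w, _ | ⟨x, tl⟩⟩⟩ <;>
    simp <;> rcases PySem.Int.ofStr? (rstripW w) with _ | n <;> simp

-- B's parse helper is A's parse with the pair swapped
theorem parse_rel (entry : String) :
    parse_entry entry = (parseE entry).map (fun p => (p.2, p.1)) := by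
  unfold parse_entry parseE
  rcases h : (PySem.Str.split? (PySem.Str.strip entry) " ").getD [] with _ | ⟨u, _ | ⟨w, _ | ⟨x, tl⟩⟩⟩ <;>
    simp <;> rcases PySem.Int.ofStr? (rstripW w) with _ | n <;> simp

-- A's candidate accumulation is filterMap parseE
theorem candA (es : List String) (acc : List (Int × String)) :
    es.foldl (fun acc entry =>
      match parseE entry with
      | some (w, u) => acc ++ [(w, u)]
      | none => acc) acc = acc ++ es.filterMap parseE := by
  induction es generalizing acc with
  | nil => simp
  | cons e es ih =>
    simp only [List.foldl_cons, List.filterMap_cons]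
    rcases h : parseE e with _ | ⟨w, u⟩ <;> simp only [h] <;> simp [ih]

-- B's state as a function of the running minimum (width, url)
def conv (t : Int) : Option (Int × String) → Option String × Option Int
  | none => (none, none)
  | some (w, u) => (some u, some |w - t|)

-- one step of min?'s fold commutes with conv
theorem conv_step (t : Int) (s : Option (Int × String)) (w : Int) (u : String) :
    (if (conv t s).2.isNone || decide (|w - t| < (conv t s).2.getD 0) then (some u, some |w - t|) else conv t s) =
    conv t (match s with
      | none => some (w, u)
      | some m => if |w - t| < |m.1 - t| then some (w, u) else some m) := by
  rcases s with _ | ⟨mw, mu⟩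
  · simp [conv]
  · by_cases hlt : |w - t| < |mw - t| <;> simp [conv, hlt]

-- one applied step of B's loop, through parseE and conv
theorem stepB_apply (t : Int) (s : Option (Int × String)) (entry : String) :
    ((parse_entry entry).elim (conv t s) (fun p =>
      let dist := |p.2 - t|
      if (conv t s).2.isNone || decide (dist < (conv t s).2.getD 0) then (some p.1, some dist)
      else conv t s)) =
    conv t (match parseE entry with
      | none => s
      | some x =>
        match s with
        | none => some x
        | some m => if |x.1 - t| < |m.1 - t| then some x else some m) := by
  rw [parse_rel]
  rcases h : parseE entry with _ | ⟨w, u⟩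
  · simp [Option.map, Option.elim]
  · simp only [Option.map, Option.elim]
    exact conv_step t s w u

-- B's fold over the entries tracks min?'s fold over the parsed candidates
theorem bfold (t : Int) (es : List String) (s : Option (Int × String)) :
    es.foldl (fun (st : Option String × Option Int) entry =>
      (parse_entry entry).elim st (fun p =>
        let dist := |p.2 - t|
        if st.2.isNone || decide (dist < st.2.getD 0) then (some p.1, some dist) else st)) (conv t s) =
    conv t ((es.filterMap parseE).foldl (fun acc x =>
      match acc with
      | none => some x
      | some m => if |x.1 - t| < |m.1 - t| then some x else some m) s) := by
  induction es generalizing s with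
  | nil => rfl
  | cons e es ih =>
    simp only [List.foldl_cons, List.filterMap_cons]
    rw [stepB_apply]
    rcases h : parseE e with _ | ⟨w, u⟩
    · simp only [h]
      exact ih s
    · simp only [h, List.foldl_cons]
      exact ih _

-- min? with this key is exactly that fold
theorem min?_eq_fold (t : Int) (xs : List (Int × String)) :
    PySem.List.min? xs (fun x => |x.1 - t|) =
    xs.foldl (fun acc x =>
      match acc with
      | none => some x
      | some m => if |x.1 - t| < |m.1 - t| then some x else some m) none := by
  unfold PySem.List.min?
  congr 1
  funext acc x
  rcases acc with _ | m <;> rfl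

-- ===== VERDICT (by name: the statement is the Claim_ definition above) =====
theorem pick_best_src_spec : Claim_equal_pick_best_src := by
  intro srcset t _
  unfold Spec_pick_best_src pick_best_src pick_best_src_alt
  simp only [stepA_fun]
  have hb := bfold t ((PySem.Str.split? srcset ",").getD []) none
  simp only [conv] at hb
  rw [hb, candA, ← min?_eq_fold]
  simp only [List.nil_append]
  rcases h : PySem.List.min? (((PySem.Str.split? srcset ",").getD []).filterMap parseE)
      (fun x => |x.1 - t|) with _ | ⟨w, u⟩
  · have hnil : ((PySem.Str.split? srcset ",").getD []).filterMap parseE = [] :=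
      (PySem.List.min?_eq_none_iff _ _).mp h
    simp [hnil, conv]
  · have hne : (((PySem.Str.split? srcset ",").getD []).filterMap parseE) ≠ [] := by
      intro hnil
      rw [hnil] at h
      simp [PySem.List.min?] at h
    simp [List.isEmpty_iff, hne, conv]
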